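-- pv_equiv track=rewrite | github.com/embydextrous/Interview | matrix/60-specificPairInMatrix.py | createMinMatrix
-- ===== SOURCE A (Python) =====
-- def createMinMatrix(M, R, C):
--     A = [[M[i][j] for j in range(C)] for i in range(R)]
--     for i in range(R):
--         for j in range(C):
--             if i == 0 and j == 0:
--                 A[i][j] = M[i][j]
--             elif i == 0:
--                 A[i][j] = min(A[i][j-1], M[i][j])
--             elif j == 0:
--                 A[i][j] = min(A[i-1][j], M[i][j])
--             else:
--                 A[i][j] = min(A[i-1][j], A[i][j-1], M[i][j])
--     return A
-- ===== SOURCE B (Python) =====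
-- def createMinMatrix(M, R, C):
--     # two separated sweeps: row-wise running minima, then column-wise running minima
--     B = []
--     for i in range(R):
--         row = []
--         for j in range(C):
--             v = M[i][j]
--             row.append(v if not row else min(row[-1], v))
--         B.append(row)
--     out = []
--     prev = None
--     for row in B:
--         cur = row if prev is None else [min(p, x) for p, x in zip(prev, row)]
--         out.append(cur)
--         prev = cur
--     return out
-- ===== Notes on version B (the rewrite author's own statement) =====
-- stated objective: alternative
-- what changed: Replaces the fused left/up/self dynamic program over one in-place matrix with two separated sweeps: a row-wise running-minimum pass followed by a column-wise running-minimum pass (zipping each row with the previous result row), exploiting separability of the 2D prefix minimum.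
import Mathlib
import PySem

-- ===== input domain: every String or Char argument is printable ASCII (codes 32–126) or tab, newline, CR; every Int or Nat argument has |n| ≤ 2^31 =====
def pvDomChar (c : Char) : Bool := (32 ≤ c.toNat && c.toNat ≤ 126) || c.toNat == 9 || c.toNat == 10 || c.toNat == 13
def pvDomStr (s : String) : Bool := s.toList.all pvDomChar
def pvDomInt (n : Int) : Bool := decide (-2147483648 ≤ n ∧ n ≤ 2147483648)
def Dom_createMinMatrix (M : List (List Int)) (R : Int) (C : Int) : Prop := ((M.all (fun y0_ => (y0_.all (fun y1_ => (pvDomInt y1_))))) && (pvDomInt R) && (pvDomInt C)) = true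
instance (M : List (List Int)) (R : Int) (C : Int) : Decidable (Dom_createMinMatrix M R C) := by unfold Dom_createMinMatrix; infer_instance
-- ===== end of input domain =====

-- B replaces A's fused left/up/self DP over one matrix by two separated sweeps (row-wise
-- running minima, then column-wise running minima); an alternative of the same cost.


-- ===== PORT A =====
-- Literal port of A: build the R×C copy, then the fused nested loops mutating A[i][j].
-- Indices produced by range(R)/range(C) are in bounds under Pre_, where pyGetD/pySetD are exact.
def createMinMatrix (M : List (List Int)) (R : Int) (C : Int) : List (List Int) :=
  let A0 := (PySem.List.pyRange 0 R 1).map (fun i =>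
    (PySem.List.pyRange 0 C 1).map (fun j => PySem.List.pyGetD (PySem.List.pyGetD M i []) j 0))
  (PySem.List.pyRange 0 R 1).foldl (fun A i =>
    (PySem.List.pyRange 0 C 1).foldl (fun A j =>
      let v : Int :=
        if i = 0 ∧ j = 0 then
          PySem.List.pyGetD (PySem.List.pyGetD M i []) j 0
        else if i = 0 then
          min (PySem.List.pyGetD (PySem.List.pyGetD A i []) (j - 1) 0)
              (PySem.List.pyGetD (PySem.List.pyGetD M i []) j 0)
        else if j = 0 then
          min (PySem.List.pyGetD (PySem.List.pyGetD A (i - 1) []) j 0)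
              (PySem.List.pyGetD (PySem.List.pyGetD M i []) j 0)
        else
          min (min (PySem.List.pyGetD (PySem.List.pyGetD A (i - 1) []) j 0)
                   (PySem.List.pyGetD (PySem.List.pyGetD A i []) (j - 1) 0))
              (PySem.List.pyGetD (PySem.List.pyGetD M i []) j 0)
      PySem.List.pySetD A i (PySem.List.pySetD (PySem.List.pyGetD A i []) j v)) A) A0

-- ===== PORT B =====
-- Literal port of B (Source B): row-wise running-min pass, then column-wise pass zipping with the previous row.
def createMinMatrix_alt (M : List (List Int)) (R : Int) (C : Int) : List (List Int) :=
  let B := (PySem.List.pyRange 0 R 1).foldl (fun B i =>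
    let row := (PySem.List.pyRange 0 C 1).foldl (fun row j =>
      let v := PySem.List.pyGetD (PySem.List.pyGetD M i []) j 0
      row ++ [if row.isEmpty then v else min (PySem.List.pyGetD row (-1) 0) v]) []
    B ++ [row]) []
  let s := B.foldl (fun (s : List (List Int) × Option (List Int)) row =>
    let cur := match s.2 with
      | none => row
      | some p => (p.zip row).map (fun q => min q.1 q.2)
    (s.1 ++ [cur], some cur)) ([], none)
  s.1

-- ===== PRECONDITION & SPEC =====
-- Pre_ excludes exactly the inputs where A raises IndexError: when C > 0, rows 0..R-1 must
-- exist and each of them must have at least C columns (when C ≤ 0 no element is ever read).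
def Pre_createMinMatrix (M : List (List Int)) (R : Int) (C : Int) : Prop :=
  C ≤ 0 ∨ (R ≤ (M.length : Int) ∧ ∀ row ∈ M.take R.toNat, C ≤ (row.length : Int))
instance (M : List (List Int)) (R : Int) (C : Int) : Decidable (Pre_createMinMatrix M R C) := by
  unfold Pre_createMinMatrix; infer_instance

def pvWitness_createMinMatrix : List (List Int) × Int × Int := ([[3, 1], [2, 5]], 2, 2)

def Spec_createMinMatrix (M : List (List Int)) (R : Int) (C : Int) (out : List (List Int)) : Prop := out = createMinMatrix_alt M R C
instance (M : List (List Int)) (R : Int) (C : Int) (out : List (List Int)) : Decidable (Spec_createMinMatrix M R C out) := by unfold Spec_createMinMatrix; infer_instance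

-- ===== CLAIM (what is proved, stated in full; the proofs are below) =====
def Claim_equal_createMinMatrix : Prop := ∀ (M : List (List Int)) (R : Int) (C : Int), Dom_createMinMatrix M R C → Pre_createMinMatrix M R C → Spec_createMinMatrix M R C (createMinMatrix M R C)

-- ===== LEMMAS AND PROOFS =====

-- Clean recursive descriptions of the two programs, used only by the proofs.

/-- Running minimum with carry `c` (the scan both rows of B and row 0 of A perform). -/
def pscan : Int → List Int → List Int
  | _, [] => []
  | c, x :: xs => min c x :: pscan (min c x) xs

/-- Row-wise running minimum (Python: `row.append(v if not row else min(row[-1], v))`). -/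
def rmin : List Int → List Int
  | [] => []
  | x :: xs => x :: pscan x xs

/-- A's fused scan along a row (carry `c`, previous result row `ps`, source row `xs`). -/
def fscan : Int → List Int → List Int → List Int
  | c, p :: ps, x :: xs => min (min p c) x :: fscan (min (min p c) x) ps xs
  | _, _, _ => []

/-- A's fused recurrence for one row `m` below previous result row `p`. -/
def frow (p m : List Int) : List Int :=
  match p, m with
  | p0 :: ps, x0 :: xs => min p0 x0 :: fscan (min p0 x0) ps xs
  | _, _ => []

/-- B's column pass below previous result row `p`. -/
def colp (p : List Int) : List (List Int) → List (List Int)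
  | [] => []
  | r :: rs => List.zipWith min p r :: colp (List.zipWith min p r) rs

/-- A's fused passes below previous result row `p`. -/
def colf (p : List Int) : List (List Int) → List (List Int)
  | [] => []
  | r :: rs => frow p r :: colf (frow p r) rs

/-- What A computes, on the truncated matrix. -/
def fusedClean : List (List Int) → List (List Int)
  | [] => []
  | r :: rs => rmin r :: colf (rmin r) rs

/-- What B's second pass computes on the row-minimised rows. -/
def sepClean : List (List Int) → List (List Int)
  | [] => []
  | r :: rs => r :: colp r rs

/-- The R×C top-left corner of M that both programs work on. -/
def trunc (M : List (List Int)) (R C : Int) : List (List Int) :=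
  (M.take R.toNat).map (fun r => r.take C.toNat)

-- ---- lengths ----
theorem pscan_length (c : Int) (xs : List Int) : (pscan c xs).length = xs.length := by
  induction xs generalizing c with
  | nil => rfl
  | cons x xs ih => simp [pscan, ih]
theorem rmin_length (t : List Int) : (rmin t).length = t.length := by
  cases t with
  | nil => rfl
  | cons x xs => simp [rmin, pscan_length]
theorem fscan_length (c : Int) (ps xs : List Int) :
    (fscan c ps xs).length = min ps.length xs.length := by
  induction ps generalizing c xs with
  | nil => cases xs <;> simp [fscan]
  | cons p ps ih =>
    cases xs with
    | nil => simp [fscan]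
    | cons x xs =>
      simp [fscan, ih]
theorem frow_length (p m : List Int) : (frow p m).length = min p.length m.length := by
  cases p with
  | nil => cases m <;> simp [frow]
  | cons p0 ps =>
    cases m with
    | nil => simp [frow]
    | cons x xs =>
      simp [frow, fscan_length]

-- ---- antitone facts ----
theorem chain_pscan (xs : List Int) (c : Int) :
    List.IsChain (fun a b => b ≤ a) (c :: pscan c xs) := by
  induction xs generalizing c with
  | nil => simp [pscan]
  | cons x xs ih =>
    simp only [pscan]
    exact List.IsChain.cons_cons (min_le_left c x) (ih _)
theorem chain'_rmin (t : List Int) : List.IsChain (fun a b => b ≤ a) (rmin t) := by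
  cases t with
  | nil => simp [rmin]
  | cons x xs => exact chain_pscan xs x
theorem chain_fscan (ps xs : List Int) (c : Int) :
    List.IsChain (fun a b => b ≤ a) (c :: fscan c ps xs) := by
  induction ps generalizing c xs with
  | nil => cases xs <;> simp [fscan]
  | cons p ps ih =>
    cases xs with
    | nil => simp [fscan]
    | cons x xs =>
      simp only [fscan]
      exact List.IsChain.cons_cons (by omega) (ih _ _)
theorem chain'_frow (p m : List Int) : List.IsChain (fun a b => b ≤ a) (frow p m) := by
  cases p with
  | nil => cases m <;> simp [frow]
  | cons p0 ps =>
    cases m with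
    | nil => simp [frow]
    | cons x xs => exact chain_fscan ps xs (min p0 x)

-- ---- separation: fused row = zip of prev row with row minimum ----
theorem fscan_eq_zip (m : List Int) : ∀ (ps : List Int) (pprev s : Int),
    List.IsChain (fun a b => b ≤ a) (pprev :: ps) →
    fscan (min pprev s) ps m = List.zipWith min ps (pscan s m) := by
  induction m with
  | nil => intro ps pprev s _; cases ps <;> rfl
  | cons x xs ih =>
    intro ps pprev s hch
    cases ps with
    | nil => rfl
    | cons p ps' =>
      have hple : p ≤ pprev := (List.isChain_cons_cons.mp hch).1
      have hkey : min (min p (min pprev s)) x = min p (min s x) := by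
        rw [← min_assoc p pprev s, min_eq_left hple, min_assoc]
      simp only [fscan, pscan, List.zipWith]
      rw [hkey]
      congr 1
      exact ih ps' p (min s x) (List.isChain_cons_cons.mp hch).2

theorem frow_eq_zip (p m : List Int) (hp : List.IsChain (fun a b => b ≤ a) p) :
    frow p m = List.zipWith min p (rmin m) := by
  cases p with
  | nil => cases m <;> rfl
  | cons p0 ps =>
    cases m with
    | nil => rfl
    | cons x xs =>
      simp only [frow, rmin, List.zipWith, List.cons.injEq]
      exact ⟨by trivial, fscan_eq_zip xs ps p0 x hp⟩

theorem colf_eq_colp (rs : List (List Int)) : ∀ (p : List Int),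
    List.IsChain (fun a b => b ≤ a) p → colf p rs = colp p (rs.map rmin) := by
  induction rs with
  | nil => intro p _; rfl
  | cons r rs ih =>
    intro p hp
    simp only [colf, colp, List.map, List.cons.injEq]
    refine ⟨frow_eq_zip p r hp, ?_⟩
    rw [← frow_eq_zip p r hp]
    exact ih (frow p r) (chain'_frow p r)

theorem fused_eq_sep (rows : List (List Int)) :
    fusedClean rows = sepClean (rows.map rmin) := by
  cases rows with
  | nil => rfl
  | cons r rs =>
    simp only [fusedClean, sepClean, List.map, List.cons.injEq]
    exact ⟨by trivial, colf_eq_colp rs (rmin r) (chain'_rmin r)⟩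

-- ---- B's port equals sepClean ∘ map rmin ∘ trunc ----
theorem zipMapMin (p r : List Int) :
    (p.zip r).map (fun q => min q.1 q.2) = List.zipWith min p r := by
  induction p generalizing r with
  | nil => simp
  | cons a p ih => cases r <;> simp [ih]

theorem rangeTake {α : Type} (xs : List α) (d : α) (n : Nat) (h : n ≤ xs.length) :
    (PySem.List.pyRange 0 (n : Int) 1).map (fun i => PySem.List.pyGetD xs i d) = xs.take n := by
  induction n with
  | zero => simp [PySem.List.pyRange_one_eq_nil (le_refl (0 : Int))]
  | succ n ih =>
    have hcast : ((n + 1 : Nat) : Int) = (n : Int) + 1 := by push_cast; ring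
    rw [hcast, PySem.List.pyRange_one_succ_right (by positivity), List.map_append,
      ih (by omega), List.map_singleton, PySem.List.pyGetD_natCast,
      List.getD_eq_getElem _ _ (by omega), List.take_succ_eq_append_getElem (by omega)]

theorem rangeTakeI {α : Type} (xs : List α) (d : α) (R : Int) (h : R ≤ (xs.length : Int)) :
    (PySem.List.pyRange 0 R 1).map (fun i => PySem.List.pyGetD xs i d) = xs.take R.toNat := by
  by_cases hR : R ≤ 0
  · rw [PySem.List.pyRange_one_eq_nil hR]
    have : R.toNat = 0 := by omega
    simp [this]
  · have : R = ((R.toNat : Nat) : Int) := by omega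
    rw [this]
    exact rangeTake xs d R.toNat (by omega)

theorem appScan (t : List Int) : ∀ (acc : List Int) (c : Int), acc ≠ [] →
    PySem.List.pyGetD acc (-1) 0 = c →
    t.foldl (fun row v => row ++ [if row.isEmpty then v else min (PySem.List.pyGetD row (-1) 0) v]) acc
      = acc ++ pscan c t := by
  induction t with
  | nil => simp [pscan]
  | cons x t ih =>
    intro acc c hne hlast
    have hemp : acc.isEmpty = false := by simpa [List.isEmpty_iff] using hne
    simp only [List.foldl_cons, hemp, Bool.false_eq_true, if_false, hlast]
    rw [ih (acc ++ [min c x]) (min c x) (by simp)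
      (PySem.List.pyGetD_neg_one_append_singleton acc (min c x) 0)]
    simp [pscan]


theorem appScan0 (t : List Int) :
    t.foldl (fun row v => row ++ [if row.isEmpty then v else min (PySem.List.pyGetD row (-1) 0) v]) []
      = rmin t := by
  cases t with
  | nil => rfl
  | cons x xs =>
    simp only [List.foldl_cons, List.isEmpty_nil, if_true, List.nil_append]
    rw [appScan xs [x] x (by simp) (PySem.List.pyGetD_neg_one_append_singleton [] x 0)]
    simp [rmin]

theorem rowBuild (m : List Int) (C : Int) (hC : C ≤ (m.length : Int)) :
    (PySem.List.pyRange 0 C 1).foldl (fun row j =>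
      let v := PySem.List.pyGetD m j 0
      row ++ [if row.isEmpty then v else min (PySem.List.pyGetD row (-1) 0) v]) []
      = rmin (m.take C.toNat) := by
  by_cases hC0 : C ≤ 0
  · rw [PySem.List.pyRange_one_eq_nil hC0]
    have : C.toNat = 0 := by omega
    simp [this, rmin]
  · set t : List Int := m.take C.toNat with ht
    have hlen : t.length = C.toNat := by simp [ht]; omega
    have hCt : C = ((t.length : Nat) : Int) := by omega
    have hcong : ∀ (row : List Int), ∀ j ∈ PySem.List.pyRange 0 C 1,
        (fun row j =>
          let v := PySem.List.pyGetD m j 0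
          row ++ [if row.isEmpty then v else min (PySem.List.pyGetD row (-1) 0) v]) row j
        = (fun row j =>
          let v := PySem.List.pyGetD t j 0
          row ++ [if row.isEmpty then v else min (PySem.List.pyGetD row (-1) 0) v]) row j := by
      intro row j hj
      have hj' := PySem.List.mem_pyRange_one.mp hj
      have hjn : j = ((j.toNat : Nat) : Int) := by omega
      have hjlt : j.toNat < C.toNat := by omega
      have : PySem.List.pyGetD m j 0 = PySem.List.pyGetD t j 0 := by
        rw [hjn, PySem.List.pyGetD_natCast, PySem.List.pyGetD_natCast,
          List.getD_eq_getElem _ _ (by omega), List.getD_eq_getElem _ _ (by rw [hlen]; omega)]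
        exact (List.getElem_take).symm
      simp only [this]
    rw [PySem.List.foldl_congr_mem _ _ _ _ hcong, hCt,
      PySem.List.foldl_pyRange_zero_pyGetD' t 0
        (fun row v => row ++ [if row.isEmpty then v else min (PySem.List.pyGetD row (-1) 0) v]) []]
    exact appScan0 t

theorem colpFold (rows : List (List Int)) : ∀ (p : List Int) (out : List (List Int)),
    (rows.foldl (fun (s : List (List Int) × Option (List Int)) row =>
      let cur := match s.2 with
        | none => row
        | some p => (p.zip row).map (fun q => min q.1 q.2)
      (s.1 ++ [cur], some cur)) (out, some p)).1 = out ++ colp p rows := by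
  induction rows with
  | nil => intro p out; simp [colp]
  | cons r rs ih =>
    intro p out
    simp only [List.foldl_cons]
    rw [ih]
    simp [zipMapMin, List.append_assoc, colp]

theorem Bport_eq (M : List (List Int)) (R C : Int) (hR : R ≤ (M.length : Int))
    (hrows : ∀ row ∈ M.take R.toNat, C ≤ (row.length : Int)) :
    createMinMatrix_alt M R C = sepClean ((trunc M R C).map rmin) := by
  unfold createMinMatrix_alt
  have hfirst :
      (PySem.List.pyRange 0 R 1).foldl (fun B i =>
        let row := (PySem.List.pyRange 0 C 1).foldl (fun row j =>
          let v := PySem.List.pyGetD (PySem.List.pyGetD M i []) j 0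
          row ++ [if row.isEmpty then v else min (PySem.List.pyGetD row (-1) 0) v]) []
        B ++ [row]) []
      = (trunc M R C).map rmin := by
    rw [PySem.List.foldl_append_singleton_eq_map (fun i =>
      (PySem.List.pyRange 0 C 1).foldl (fun row j =>
        let v := PySem.List.pyGetD (PySem.List.pyGetD M i []) j 0
        row ++ [if row.isEmpty then v else min (PySem.List.pyGetD row (-1) 0) v]) []), List.nil_append]
    have hmem : ∀ i ∈ PySem.List.pyRange 0 R 1,
        (PySem.List.pyRange 0 C 1).foldl (fun row j =>
          let v := PySem.List.pyGetD (PySem.List.pyGetD M i []) j 0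
          row ++ [if row.isEmpty then v else min (PySem.List.pyGetD row (-1) 0) v]) []
        = rmin ((PySem.List.pyGetD M i []).take C.toNat) := by
      intro i hi
      have hi' := PySem.List.mem_pyRange_one.mp hi
      have hCi : C ≤ ((PySem.List.pyGetD M i []).length : Int) := by
        have hin : i.toNat < M.length := by omega
        have hrow : PySem.List.pyGetD M i [] = M.getD i.toNat [] := by
          conv_lhs => rw [show i = ((i.toNat : Nat) : Int) by omega]
          exact PySem.List.pyGetD_natCast M i.toNat []
        rw [hrow, List.getD_eq_getElem _ _ hin]
        refine hrows _ ?_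
        rw [show M[i.toNat] = (M.take R.toNat)[i.toNat]'(by simp; omega) from
          (List.getElem_take).symm]
        exact List.getElem_mem _
      exact rowBuild (PySem.List.pyGetD M i []) C hCi
    rw [List.map_congr_left hmem, show (fun i => rmin ((PySem.List.pyGetD M i []).take C.toNat))
        = (fun r : List Int => rmin (r.take C.toNat)) ∘ (fun i => PySem.List.pyGetD M i []) from rfl,
      ← List.map_map, rangeTakeI M [] R hR]
    simp [trunc, List.map_map]
    rfl
  rw [hfirst]
  cases hrs : (trunc M R C).map rmin with
  | nil => simp [sepClean]
  | cons r rs => exact colpFold rs r [r]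

-- ---- getD recurrences for the fused scans ----
theorem pscan_getD (xs : List Int) : ∀ (c : Int) (k : Nat), k < xs.length →
    (pscan c xs).getD k 0
      = min (if k = 0 then c else (pscan c xs).getD (k - 1) 0) (xs.getD k 0) := by
  induction xs with
  | nil => intro c k hk; simp at hk
  | cons x xs ih =>
    intro c k hk
    cases k with
    | zero => simp [pscan]
    | succ k =>
      simp only [pscan, List.getD_cons_succ, Nat.succ_ne_zero, if_false, Nat.add_sub_cancel]
      rw [ih (min c x) k (by simpa using hk)]
      cases k with
      | zero => simp
      | succ k => simp

theorem rmin_getD (t : List Int) (k : Nat) (hk : k < t.length) :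
    (rmin t).getD k 0
      = if k = 0 then t.getD 0 0 else min ((rmin t).getD (k - 1) 0) (t.getD k 0) := by
  cases t with
  | nil => simp at hk
  | cons x xs =>
    cases k with
    | zero => simp [rmin]
    | succ k =>
      simp only [rmin, List.getD_cons_succ, Nat.succ_ne_zero, if_false, Nat.add_sub_cancel]
      rw [pscan_getD xs x k (by simpa using hk)]
      cases k with
      | zero => simp
      | succ k => simp

theorem fscan_getD (ps : List Int) : ∀ (xs : List Int) (c : Int) (k : Nat),
    k < min ps.length xs.length →
    (fscan c ps xs).getD k 0
      = min (min (ps.getD k 0) (if k = 0 then c else (fscan c ps xs).getD (k - 1) 0))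
            (xs.getD k 0) := by
  induction ps with
  | nil => intro xs c k hk; simp at hk
  | cons p ps ih =>
    intro xs c k hk
    cases xs with
    | nil => simp at hk
    | cons x xs =>
      cases k with
      | zero => simp [fscan]
      | succ k =>
        simp only [fscan, List.getD_cons_succ, Nat.succ_ne_zero, if_false, Nat.add_sub_cancel]
        rw [ih xs (min (min p c) x) k (by simp at hk ⊢; omega)]
        cases k with
        | zero => simp
        | succ k => simp

theorem frow_getD (p t : List Int) (k : Nat) (hk : k < min p.length t.length) :
    (frow p t).getD k 0
      = if k = 0 then min (p.getD 0 0) (t.getD 0 0)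
        else min (min (p.getD k 0) ((frow p t).getD (k - 1) 0)) (t.getD k 0) := by
  cases p with
  | nil => simp at hk
  | cons p0 ps =>
    cases t with
    | nil => simp at hk
    | cons x xs =>
      cases k with
      | zero => simp [frow]
      | succ k =>
        simp only [frow, List.getD_cons_succ, Nat.succ_ne_zero, if_false, Nat.add_sub_cancel]
        rw [fscan_getD ps xs (min p0 x) k (by simp at hk ⊢; omega)]
        cases k with
        | zero => simp
        | succ k => simp

theorem frow_nil_right (p : List Int) : frow p [] = [] := by
  cases p <;> rfl

-- ---- fusedClean row access and row lengths ----
theorem colf_length (p : List Int) (rs : List (List Int)) : (colf p rs).length = rs.length := by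
  induction rs generalizing p with
  | nil => rfl
  | cons r rs ih => simp [colf, ih]
theorem fusedClean_length (rows : List (List Int)) : (fusedClean rows).length = rows.length := by
  cases rows with
  | nil => rfl
  | cons r rs => simp [fusedClean, colf_length]
theorem colf_getD (rs : List (List Int)) : ∀ (p : List Int) (k : Nat), k < rs.length →
    (colf p rs).getD k []
      = frow (if k = 0 then p else (colf p rs).getD (k - 1) []) (rs.getD k []) := by
  induction rs with
  | nil => intro p k hk; simp at hk
  | cons r rs ih =>
    intro p k hk
    cases k with
    | zero => simp [colf]
    | succ k =>
      simp only [colf, List.getD_cons_succ, Nat.succ_ne_zero, if_false, Nat.add_sub_cancel]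
      rw [ih (frow p r) k (by simpa using hk)]
      cases k with
      | zero => simp
      | succ k => simp
theorem fusedClean_getD (rows : List (List Int)) (k : Nat) (hk : k < rows.length) :
    (fusedClean rows).getD k []
      = if k = 0 then rmin (rows.getD 0 [])
        else frow ((fusedClean rows).getD (k - 1) []) (rows.getD k []) := by
  cases rows with
  | nil => simp at hk
  | cons r rs =>
    cases k with
    | zero => simp [fusedClean]
    | succ k =>
      simp only [fusedClean, List.getD_cons_succ, Nat.succ_ne_zero, if_false, Nat.add_sub_cancel]
      rw [colf_getD rs (rmin r) k (by simpa using hk)]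
      cases k with
      | zero => simp
      | succ k => simp
theorem colf_row_length (rs : List (List Int)) (n : Nat) : ∀ (p : List Int),
    p.length = n → (∀ r ∈ rs, r.length = n) → ∀ r ∈ colf p rs, r.length = n := by
  induction rs with
  | nil => intro p _ _ r hr; simp [colf] at hr
  | cons r0 rs ih =>
    intro p hp hall r hr
    have hfr : (frow p r0).length = n := by
      rw [frow_length, hp, hall r0 (by simp)]; omega
    rcases List.mem_cons.mp hr with h | h
    · rw [h]; exact hfr
    · exact ih (frow p r0) hfr (fun r hr => hall r (by simp [hr])) r h
theorem fusedClean_row_length (rows : List (List Int)) (n : Nat)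
    (h : ∀ r ∈ rows, r.length = n) : ∀ r ∈ fusedClean rows, r.length = n := by
  cases rows with
  | nil => intro r hr; simp [fusedClean] at hr
  | cons r0 rs =>
    intro r hr
    have h0 : (rmin r0).length = n := by rw [rmin_length]; exact h r0 (by simp)
    rcases List.mem_cons.mp hr with hh | hh
    · rw [hh]; exact h0
    · exact colf_row_length rs n (rmin r0) h0 (fun r hr => h r (by simp [hr])) r hh
theorem trunc_row_length (M : List (List Int)) (R C : Int)
    (hrows : ∀ row ∈ M.take R.toNat, C ≤ (row.length : Int)) :
    ∀ r ∈ trunc M R C, r.length = C.toNat := by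
  intro r hr
  obtain ⟨row, hrow, hre⟩ := List.mem_map.mp hr
  have := hrows row hrow
  rw [← hre]
  simp
  omega

-- ---- A's inner loop over one row (index form = clean row) ----
/-- Body of A's inner loop acting on row `r` only; `p` is the previous result row, `m` the source row. -/
def bodyA (i : Int) (p m : List Int) (r : List Int) (j : Int) : List Int :=
  let v : Int :=
    if i = 0 ∧ j = 0 then PySem.List.pyGetD m j 0
    else if i = 0 then min (PySem.List.pyGetD r (j - 1) 0) (PySem.List.pyGetD m j 0)
    else if j = 0 then min (PySem.List.pyGetD p j 0) (PySem.List.pyGetD m j 0)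
    else min (min (PySem.List.pyGetD p j 0) (PySem.List.pyGetD r (j - 1) 0))
             (PySem.List.pyGetD m j 0)
  PySem.List.pySetD r j v

theorem rowLoopA (i : Int) (p m : List Int) (n : Nat) (t : List Int)
    (ht : t = m.take n) (hn : n ≤ m.length) (hp : i = 0 ∨ p.length = n) :
    ∀ (d k : Nat), k + d = n →
    (PySem.List.pyRange (k : Int) (n : Int) 1).foldl (bodyA i p m)
        ((if i = 0 then rmin t else frow p t).take k ++ t.drop k)
      = (if i = 0 then rmin t else frow p t) := by
  have htl : t.length = n := by rw [ht]; simp; omega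
  set F : List Int := if i = 0 then rmin t else frow p t with hFdef
  have hF : F.length = n := by
    by_cases hi0 : i = 0
    · simp [hFdef, hi0, rmin_length, htl]
    · rcases hp with hh | hh
      · exact absurd hh hi0
      · simp [hFdef, hi0, frow_length, htl, hh]
  have hmt : ∀ j : Nat, j < n → m.getD j 0 = t.getD j 0 := by
    intro j hj
    rw [ht, List.getD_eq_getElem _ _ (by omega), List.getD_eq_getElem _ _ (by simp; omega)]
    exact (List.getElem_take).symm
  have hFget : ∀ j : Nat, j < n → F.getD j 0 =
      if j = 0 then (if i = 0 then t.getD 0 0 else min (p.getD 0 0) (t.getD 0 0))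
      else (if i = 0 then min (F.getD (j - 1) 0) (t.getD j 0)
            else min (min (p.getD j 0) (F.getD (j - 1) 0)) (t.getD j 0)) := by
    intro j hj
    by_cases hi0 : i = 0
    · simp only [hFdef, hi0, if_true]
      exact rmin_getD t j (by omega)
    · rcases hp with hh | hh
      · exact absurd hh hi0
      · simp only [hFdef, hi0, if_false]
        exact frow_getD p t j (by omega)
  intro d
  induction d with
  | zero =>
    intro k hk
    have hkn : k = n := by omega
    rw [PySem.List.pyRange_one_eq_nil (by omega), List.foldl_nil,
      List.take_of_length_le (by omega), List.drop_of_length_le (by omega), List.append_nil]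
  | succ d ih =>
    intro k hk
    have hkn : k < n := by omega
    have hstep : bodyA i p m (F.take k ++ t.drop k) (k : Int) = F.take (k + 1) ++ t.drop (k + 1) := by
      have hlenTk : (F.take k).length = k := by simp; omega
      have hread : ∀ j : Nat, j < k → (F.take k ++ t.drop k).getD j 0 = F.getD j 0 := by
        intro j hj
        rw [List.getD_append _ _ _ j (by omega), List.getD_eq_getElem _ _ (by omega),
          List.getD_eq_getElem _ _ (by omega)]
        exact List.getElem_take
      have hv : bodyA i p m (F.take k ++ t.drop k) (k : Int)
          = (F.take k ++ t.drop k).set k (F.getD k 0) := by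
        simp only [bodyA]
        rw [PySem.List.pySetD_natCast]
        congr 1
        have hiffk : (((k : Nat) : Int) = 0) ↔ (k = 0) := by omega
        by_cases hk0 : k = 0
        · subst hk0
          simp only [PySem.List.pyGetD_natCast]
          rw [hmt 0 hkn, hFget 0 hkn]
          by_cases hi0 : i = 0 <;> simp [hi0]
        · have hc1 : ((k : Nat) : Int) - 1 = ((k - 1 : Nat) : Int) := by omega
          have hrd := hread (k - 1) (by omega)
          have hmtk := hmt k hkn
          have hFgetk := hFget k hkn
          rw [hc1]
          simp only [PySem.List.pyGetD_natCast, hrd, hmtk, hFgetk, hiffk, hk0,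
            if_false, and_false]
      rw [hv, List.set_append]
      simp only [hlenTk, lt_irrefl, if_false, Nat.sub_self]
      rw [List.drop_eq_getElem_cons (by omega : k < t.length), List.set_cons_zero,
        List.take_succ_eq_append_getElem (by omega : k < F.length),
        List.getD_eq_getElem _ _ (by omega), List.append_assoc, List.singleton_append]
    rw [PySem.List.pyRange_one_cons (by omega), List.foldl_cons, hstep,
      show ((k : Int) + 1) = ((k + 1 : Nat) : Int) by omega]
    exact ih (k + 1) (by omega)

-- ---- A's inner loop decomposes to a row update ----
theorem innerFold (M : List (List Int)) (i : Int) (hi : 0 ≤ i) :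
    ∀ (js : List Int) (A : List (List Int)), i < (A.length : Int) → (∀ j ∈ js, 0 ≤ j) →
    js.foldl (fun A j =>
      let v : Int :=
        if i = 0 ∧ j = 0 then
          PySem.List.pyGetD (PySem.List.pyGetD M i []) j 0
        else if i = 0 then
          min (PySem.List.pyGetD (PySem.List.pyGetD A i []) (j - 1) 0)
              (PySem.List.pyGetD (PySem.List.pyGetD M i []) j 0)
        else if j = 0 then
          min (PySem.List.pyGetD (PySem.List.pyGetD A (i - 1) []) j 0)
              (PySem.List.pyGetD (PySem.List.pyGetD M i []) j 0)
        else
          min (min (PySem.List.pyGetD (PySem.List.pyGetD A (i - 1) []) j 0)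
                   (PySem.List.pyGetD (PySem.List.pyGetD A i []) (j - 1) 0))
              (PySem.List.pyGetD (PySem.List.pyGetD M i []) j 0)
      PySem.List.pySetD A i (PySem.List.pySetD (PySem.List.pyGetD A i []) j v)) A
      = PySem.List.pySetD A i
          (js.foldl (bodyA i (PySem.List.pyGetD A (i - 1) []) (PySem.List.pyGetD M i []))
            (PySem.List.pyGetD A i [])) := by
  intro js
  induction js with
  | nil =>
    intro A hA _
    have hi' : i.toNat < A.length := by omega
    rw [List.foldl_nil, PySem.List.pyGetD_eq_getElem A [] hi (by omega),
      PySem.List.pySetD_of_nonneg A _ hi]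
    exact (List.set_getElem_self hi').symm
  | cons j js ih =>
    intro A hA hjs
    have hj0 : 0 ≤ j := hjs j (by simp)
    have hi' : i.toNat < A.length := by omega
    -- one step of the loop
    set p := PySem.List.pyGetD A (i - 1) [] with hpdef
    set r := PySem.List.pyGetD A i [] with hrdef
    set r' := bodyA i p (PySem.List.pyGetD M i []) r j with hr'def
    have hstep1 : List.foldl (fun A j =>
      let v : Int :=
        if i = 0 ∧ j = 0 then
          PySem.List.pyGetD (PySem.List.pyGetD M i []) j 0
        else if i = 0 then
          min (PySem.List.pyGetD (PySem.List.pyGetD A i []) (j - 1) 0)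
              (PySem.List.pyGetD (PySem.List.pyGetD M i []) j 0)
        else if j = 0 then
          min (PySem.List.pyGetD (PySem.List.pyGetD A (i - 1) []) j 0)
              (PySem.List.pyGetD (PySem.List.pyGetD M i []) j 0)
        else
          min (min (PySem.List.pyGetD (PySem.List.pyGetD A (i - 1) []) j 0)
                   (PySem.List.pyGetD (PySem.List.pyGetD A i []) (j - 1) 0))
              (PySem.List.pyGetD (PySem.List.pyGetD M i []) j 0)
      PySem.List.pySetD A i (PySem.List.pySetD (PySem.List.pyGetD A i []) j v)) A (j :: js)
        = List.foldl (fun A j =>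
      let v : Int :=
        if i = 0 ∧ j = 0 then
          PySem.List.pyGetD (PySem.List.pyGetD M i []) j 0
        else if i = 0 then
          min (PySem.List.pyGetD (PySem.List.pyGetD A i []) (j - 1) 0)
              (PySem.List.pyGetD (PySem.List.pyGetD M i []) j 0)
        else if j = 0 then
          min (PySem.List.pyGetD (PySem.List.pyGetD A (i - 1) []) j 0)
              (PySem.List.pyGetD (PySem.List.pyGetD M i []) j 0)
        else
          min (min (PySem.List.pyGetD (PySem.List.pyGetD A (i - 1) []) j 0)
                   (PySem.List.pyGetD (PySem.List.pyGetD A i []) (j - 1) 0))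
              (PySem.List.pyGetD (PySem.List.pyGetD M i []) j 0)
      PySem.List.pySetD A i (PySem.List.pySetD (PySem.List.pyGetD A i []) j v))
        (PySem.List.pySetD A i r') js := rfl
    rw [hstep1, ih (PySem.List.pySetD A i r') (by rw [PySem.List.length_pySetD]; omega) 
      (fun j hj => hjs j (by simp [hj]))]
    have hr'' : PySem.List.pyGetD (PySem.List.pySetD A i r') i [] = r' := by
      conv_lhs => rw [show i = ((i.toNat : Nat) : Int) by omega]
      rw [PySem.List.pySetD_natCast, PySem.List.pyGetD_natCast,
        List.getD_eq_getElem _ _ (by simp; omega)]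
      exact List.getElem_set_self _
    have hsetset : ∀ X : List Int,
        PySem.List.pySetD (PySem.List.pySetD A i r') i X = PySem.List.pySetD A i X := by
      intro X
      conv_lhs => rw [show i = ((i.toNat : Nat) : Int) by omega]
      conv_rhs => rw [show i = ((i.toNat : Nat) : Int) by omega]
      rw [PySem.List.pySetD_natCast, PySem.List.pySetD_natCast, PySem.List.pySetD_natCast]
      exact List.set_set r' 
    rw [hr'']
    by_cases hi0 : i = 0
    · rw [hsetset]
      congr 1
      rw [List.foldl_cons, hr'def.symm]
      apply PySem.List.foldl_congr_mem
      intro acc x hx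
      simp [bodyA, hi0]
    · have hp' : PySem.List.pyGetD (PySem.List.pySetD A i r') (i - 1) [] = p := by
        have hi1 : 1 ≤ i := by omega
        conv_lhs => rw [show i - 1 = ((i.toNat - 1 : Nat) : Int) by omega,
          show i = ((i.toNat : Nat) : Int) by omega]
        rw [PySem.List.pySetD_natCast, PySem.List.pyGetD_natCast,
          List.getD_eq_getElem _ _ (by simp; omega),
          List.getElem_set_ne (by omega) (by simp; omega), hpdef]
        conv_rhs => rw [show i - 1 = ((i.toNat - 1 : Nat) : Int) by omega]
        rw [PySem.List.pyGetD_natCast, List.getD_eq_getElem _ _ (by omega)]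
        congr 1
      rw [hp', hsetset, List.foldl_cons, hr'def.symm]

-- ---- A's outer loop ----
theorem outerFold (M : List (List Int)) (R C : Int) (hR : R ≤ (M.length : Int))
    (hrows : ∀ row ∈ M.take R.toNat, C ≤ (row.length : Int)) :
    ∀ (d k : Nat), k + d = (trunc M R C).length →
    (PySem.List.pyRange (k : Int) R 1).foldl (fun A i =>
      (PySem.List.pyRange 0 C 1).foldl (fun A j =>
        let v : Int :=
          if i = 0 ∧ j = 0 then
            PySem.List.pyGetD (PySem.List.pyGetD M i []) j 0
          else if i = 0 then
            min (PySem.List.pyGetD (PySem.List.pyGetD A i []) (j - 1) 0)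
                (PySem.List.pyGetD (PySem.List.pyGetD M i []) j 0)
          else if j = 0 then
            min (PySem.List.pyGetD (PySem.List.pyGetD A (i - 1) []) j 0)
                (PySem.List.pyGetD (PySem.List.pyGetD M i []) j 0)
          else
            min (min (PySem.List.pyGetD (PySem.List.pyGetD A (i - 1) []) j 0)
                     (PySem.List.pyGetD (PySem.List.pyGetD A i []) (j - 1) 0))
                (PySem.List.pyGetD (PySem.List.pyGetD M i []) j 0)
        PySem.List.pySetD A i (PySem.List.pySetD (PySem.List.pyGetD A i []) j v)) A)
      ((fusedClean (trunc M R C)).take k ++ (trunc M R C).drop k)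
      = fusedClean (trunc M R C) := by
  set T : List (List Int) := trunc M R C with hTdef
  set Fm : List (List Int) := fusedClean T with hFmdef
  have hTlen : T.length = R.toNat := by simp [hTdef, trunc]; omega
  have hFlen : Fm.length = T.length := fusedClean_length T
  have hTrow : ∀ r ∈ T, r.length = C.toNat := trunc_row_length M R C hrows
  have hFrow : ∀ r ∈ Fm, r.length = C.toNat := fusedClean_row_length T C.toNat hTrow
  intro d
  induction d with
  | zero =>
    intro k hk
    rw [PySem.List.pyRange_one_eq_nil (a := ((k : Nat) : Int)) (b := R) (by omega),
      List.foldl_nil, List.take_of_length_le (by omega), List.drop_of_length_le (by omega),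
      List.append_nil]
  | succ d ih =>
    intro k hk
    have hkT : k < T.length := by omega
    have hkR : (k : Int) < R := by omega
    have hkM : k < M.length := by omega
    set Ak : List (List Int) := Fm.take k ++ T.drop k with hAkdef
    have hAklen : Ak.length = T.length := by simp [hAkdef]; omega
    rw [PySem.List.pyRange_one_cons (a := ((k : Nat) : Int)) (b := R) (by omega)]
    simp only [List.foldl_cons]
    rw [innerFold M (k : Int) (by omega) (PySem.List.pyRange 0 C 1) Ak (by omega)
      (fun j hj => (PySem.List.mem_pyRange_one.mp hj).1)]
    -- identify the pieces read by the inner loop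
    have hr0 : PySem.List.pyGetD Ak (k : Int) [] = T.getD k [] := by
      rw [PySem.List.pyGetD_natCast, hAkdef,
        List.getD_append_right _ _ _ _ (by simp),
        show k - ((Fm.take k).length) = 0 by simp; omega,
        List.drop_eq_getElem_cons hkT, List.getD_cons_zero,
        List.getD_eq_getElem _ _ hkT]
    have hp1 : k ≠ 0 → PySem.List.pyGetD Ak ((k : Int) - 1) [] = Fm.getD (k - 1) [] := by
      intro hk0
      rw [show (k : Int) - 1 = ((k - 1 : Nat) : Int) by omega, PySem.List.pyGetD_natCast,
        hAkdef, List.getD_append _ _ _ _ (by simp; omega),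
        List.getD_eq_getElem _ _ (by simp; omega), List.getD_eq_getElem _ _ (by omega)]
      exact List.getElem_take
    have hmval : PySem.List.pyGetD M (k : Int) [] = M.getD k [] :=
      PySem.List.pyGetD_natCast M k []
    have hmem : M[k] ∈ M.take R.toNat := by
      rw [show M[k] = (M.take R.toNat)[k]'(by simp; omega) from (List.getElem_take).symm]
      exact List.getElem_mem _
    have hn : C.toNat ≤ (M.getD k []).length := by
      have := hrows M[k] hmem
      rw [List.getD_eq_getElem _ _ hkM]
      omega
    have hTk : T.getD k [] = (M.getD k []).take C.toNat := by
      rw [List.getD_eq_getElem _ _ hkT, List.getD_eq_getElem _ _ hkM]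
      simp [hTdef, trunc]
    have htmem : T.getD k [] ∈ T := by
      rw [List.getD_eq_getElem _ _ hkT]
      exact List.getElem_mem _
    have hpOr : ((k : Int) = 0) ∨ (PySem.List.pyGetD Ak ((k : Int) - 1) []).length = C.toNat := by
      by_cases hk0 : k = 0
      · left; omega
      · right
        rw [hp1 hk0]
        have hf : Fm.getD (k - 1) [] ∈ Fm := by
          rw [List.getD_eq_getElem _ _ (by omega)]
          exact List.getElem_mem _
        exact hFrow _ hf
    -- the inner loop computes row k of the fused result
    have hFmk : Fm.getD k [] = if (k : Int) = 0 then rmin (T.getD k [])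
        else frow (PySem.List.pyGetD Ak ((k : Int) - 1) []) (T.getD k []) := by
      rw [fusedClean_getD T k hkT]
      by_cases hk0 : k = 0
      · simp [hk0]
      · rw [if_neg hk0, if_neg (by omega : ¬ ((k : Int) = 0)), hp1 hk0]
    have hrow : (PySem.List.pyRange 0 C 1).foldl
        (bodyA (k : Int) (PySem.List.pyGetD Ak ((k : Int) - 1) []) (PySem.List.pyGetD M (k : Int) []))
        (PySem.List.pyGetD Ak (k : Int) []) = Fm.getD k [] := by
      by_cases hC : 0 ≤ C
      · have HR := rowLoopA (k : Int) (PySem.List.pyGetD Ak ((k : Int) - 1) [])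
          (PySem.List.pyGetD M (k : Int) []) C.toNat (T.getD k [])
          (by rw [hTk, hmval]) (by rw [hmval]; exact hn) hpOr C.toNat 0 (by omega)
        simp only [List.take_zero, List.drop_zero, List.nil_append, Nat.cast_zero] at HR
        rw [show ((C.toNat : Nat) : Int) = C by omega] at HR
        rw [hr0, HR, hFmk]
      · have htnil : T.getD k [] = [] := by
          have := hTrow _ htmem
          have : (T.getD k []).length = 0 := by omega
          exact List.eq_nil_of_length_eq_zero this
        rw [PySem.List.pyRange_one_eq_nil (by omega), List.foldl_nil, hr0, hFmk, htnil]
        by_cases hk0 : (k : Int) = 0 <;> simp [hk0, rmin, frow_nil_right]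
    rw [hrow]
    have hstep : PySem.List.pySetD Ak (k : Int) (Fm.getD k []) = Fm.take (k + 1) ++ T.drop (k + 1) := by
      rw [PySem.List.pySetD_natCast, hAkdef, List.set_append]
      have hlt : (Fm.take k).length = k := by simp; omega
      rw [hlt]
      simp only [lt_irrefl, if_false, Nat.sub_self]
      rw [List.drop_eq_getElem_cons hkT, List.set_cons_zero,
        List.take_succ_eq_append_getElem (by omega : k < Fm.length),
        List.getD_eq_getElem _ _ (by omega), List.append_assoc, List.singleton_append]
    rw [hstep, show ((k : Int) + 1) = ((k + 1 : Nat) : Int) by omega]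
    exact ih (k + 1) (by omega)

theorem Aport_eq (M : List (List Int)) (R C : Int) (hR : R ≤ (M.length : Int))
    (hrows : ∀ row ∈ M.take R.toNat, C ≤ (row.length : Int)) :
    createMinMatrix M R C = fusedClean (trunc M R C) := by
  unfold createMinMatrix
  have hA0 : (PySem.List.pyRange 0 R 1).map (fun i =>
      (PySem.List.pyRange 0 C 1).map (fun j => PySem.List.pyGetD (PySem.List.pyGetD M i []) j 0))
      = trunc M R C := by
    have hmem : ∀ i ∈ PySem.List.pyRange 0 R 1,
        (PySem.List.pyRange 0 C 1).map (fun j => PySem.List.pyGetD (PySem.List.pyGetD M i []) j 0)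
        = (PySem.List.pyGetD M i []).take C.toNat := by
      intro i hi
      have hi' := PySem.List.mem_pyRange_one.mp hi
      have hin : i.toNat < M.length := by omega
      have hCi : C ≤ ((PySem.List.pyGetD M i []).length : Int) := by
        have hrow : PySem.List.pyGetD M i [] = M.getD i.toNat [] := by
          conv_lhs => rw [show i = ((i.toNat : Nat) : Int) by omega]
          rw [PySem.List.pyGetD_natCast]
        rw [hrow, List.getD_eq_getElem _ _ hin]
        refine hrows _ ?_
        rw [show M[i.toNat] = (M.take R.toNat)[i.toNat]'(by simp; omega) from
          (List.getElem_take).symm]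
        exact List.getElem_mem _
      exact rangeTakeI (PySem.List.pyGetD M i []) 0 C hCi
    rw [List.map_congr_left hmem, show (fun i => (PySem.List.pyGetD M i []).take C.toNat)
        = (fun r : List Int => r.take C.toNat) ∘ (fun i => PySem.List.pyGetD M i []) from rfl,
      ← List.map_map, rangeTakeI M [] R hR]
    rfl
  rw [hA0]
  have HO := outerFold M R C hR hrows (trunc M R C).length 0 (by omega)
  simp only [List.take_zero, List.drop_zero, List.nil_append, Nat.cast_zero] at HO
  exact HO

theorem colp_nils (rs : List (List Int)) (h : ∀ r ∈ rs, r = ([] : List Int)) :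
    ∀ p, colp p rs = rs := by
  induction rs with
  | nil => intro p; rfl
  | cons r rs ih =>
    intro p
    have hr : r = ([] : List Int) := h r (by simp)
    simp only [colp, hr, List.zipWith_nil_right, List.cons.injEq]
    exact ⟨by trivial, ih (fun r hr => h r (by simp [hr])) []⟩

-- When C ≤ 0 both programs never read M: each builds R empty rows.
theorem nilCols_eq (M : List (List Int)) (R C : Int) (hC : C ≤ 0) :
    createMinMatrix M R C = createMinMatrix_alt M R C := by
  unfold createMinMatrix createMinMatrix_alt
  rw [PySem.List.pyRange_one_eq_nil hC]
  simp only [List.foldl_nil, List.map_nil, PySem.List.foldl_ignore]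
  rw [PySem.List.foldl_append_singleton_eq_map (fun _ : Int => ([] : List Int)), List.nil_append]
  have hall : ∀ r ∈ (PySem.List.pyRange 0 R 1).map (fun _ : Int => ([] : List Int)),
      r = ([] : List Int) := by
    intro r hr
    obtain ⟨_, _, hre⟩ := List.mem_map.mp hr
    exact hre.symm
  cases hrows : (PySem.List.pyRange 0 R 1).map (fun _ : Int => ([] : List Int)) with
  | nil => rfl
  | cons r rs =>
    exact ((colpFold rs r [r]).trans (by
      rw [colp_nils rs (fun x hx => hall x (by rw [hrows]; simp [hx])) r]
      rfl)).symm

-- ===== VERDICT (by name: the statement is the Claim_ definition above) =====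
theorem createMinMatrix_spec : Claim_equal_createMinMatrix := by
  intro M R C _ hpre
  unfold Spec_createMinMatrix
  rcases hpre with hC | ⟨hR, hrows⟩
  · exact nilCols_eq M R C hC
  · rw [Aport_eq M R C hR hrows, Bport_eq M R C hR hrows, fused_eq_sep]
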